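-- pv_equiv track=rewrite | github.com/Grasseh/adventofcode-2017 | solvers/day09a.py | solve
-- ===== SOURCE A (Python) =====
-- def solve(fn_input):
--     instructions = fn_input[:-1]
--     points = 0
--     depth = 0
--     in_garbage = False
--     is_cancelled = False
--     for char in instructions:
--         if is_cancelled:
--             is_cancelled = False
--             continue
--         if in_garbage:
--             if char == ">":
--                 in_garbage = False
--             if char == "!":
--                 is_cancelled = True
--             continue
--         if char == "<":
--             in_garbage = True
--             continue
--         if char == "{":
--             depth += 1
--             points += depth
--             continue
--         if char == "}":
--             depth -= 1
--     return points
-- ===== SOURCE B (Python) =====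
-- def _strip_garbage(s):
--     # pass 1: delete all garbage (with '!' cancelling the next char inside it),
--     # keeping only the group braces
--     braces = []
--     it = iter(s)
--     for c in it:
--         if c == '<':
--             for g in it:
--                 if g == '!':
--                     next(it, None)
--                 elif g == '>':
--                     break
--         elif c in '{}':
--             braces.append(c)
--     return braces
--
--
-- def solve(fn_input):
--     braces = _strip_garbage(fn_input[:-1])
--     # pass 2: list of the depth of every group opening
--     depths = []
--     d = 0
--     for c in braces:
--         d += 1 if c == '{' else -1
--         if c == '{':
--             depths.append(d)
--     return sum(depths)
-- ===== Notes on version B (the rewrite author's own statement) =====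
-- stated objective: alternative
-- what changed: Replaces A's monolithic flag state machine (in_garbage/is_cancelled, score accumulated inline) by a staged pipeline: a first pass strips all garbage via an iterator-consuming nested loop and materializes the list of group braces, a second pass turns that list into the list of group depths, and the result is their sum.
import Mathlib
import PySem

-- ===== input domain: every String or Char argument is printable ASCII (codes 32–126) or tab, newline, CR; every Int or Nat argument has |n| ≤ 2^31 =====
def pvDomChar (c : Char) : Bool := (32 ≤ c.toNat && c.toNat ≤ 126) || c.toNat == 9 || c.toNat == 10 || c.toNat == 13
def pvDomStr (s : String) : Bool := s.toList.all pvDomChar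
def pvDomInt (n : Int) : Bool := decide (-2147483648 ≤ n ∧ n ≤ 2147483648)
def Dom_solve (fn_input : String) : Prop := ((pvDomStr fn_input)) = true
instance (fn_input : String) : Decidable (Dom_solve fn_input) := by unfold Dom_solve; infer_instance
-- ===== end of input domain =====

-- B replaces A's single-pass flag state machine by a staged pipeline: strip garbage to a
-- brace list, map it to the list of group depths, sum (objective: alternative decomposition).

-- ===== PORT A =====
-- A's loop body as a step on the state (points, depth, in_garbage, is_cancelled)
def stepA (st : Int × Int × Bool × Bool) (c : Char) : Int × Int × Bool × Bool :=
  match st with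
  | (points, depth, inG, canc) =>
    if canc then (points, depth, inG, false)
    else if inG then (points, depth, (if c = '>' then false else inG), decide (c = '!'))
    else if c = '<' then (points, depth, true, false)
    else if c = '{' then (points + (depth + 1), depth + 1, false, false)
    else if c = '}' then (points, depth - 1, false, false)
    else (points, depth, false, false)

def solve (fn_input : String) : Int :=
  -- instructions = fn_input[:-1]
  ((PySem.List.slice fn_input.toList none (some (-1))).foldl stepA (0, 0, false, false)).1

-- ===== PORT B =====
-- inner 'for g in it' loop of _strip_garbage: consume one garbage run, return the
-- rest of the character stream after its closing '>' (or [] if unterminated)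
def skipB : List Char → List Char
  | [] => []
  | g :: rest =>
    if g = '!' then skipB (rest.drop 1)   -- next(it, None) consumes one more char
    else if g = '>' then rest
    else skipB rest
termination_by cs => cs.length
decreasing_by all_goals simp

-- cited by stripB's decreasing_by
theorem skipB_len (cs : List Char) : (skipB cs).length ≤ cs.length := by
  induction cs using skipB.induct with
  | case1 => simp [skipB]
  | case2 rest ih => have hs : skipB ('!' :: rest) = skipB (rest.drop 1) := by simp [skipB]
                     rw [hs]; simp at ih ⊢; omega
  | case3 rest h1 => have hs : skipB ('>' :: rest) = rest := by simp [skipB]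
                     rw [hs]; simp
  | case4 g rest h1 h2 ih => have hs : skipB (g :: rest) = skipB rest := by simp [skipB, h1, h2]
                             rw [hs]; simp; omega

-- outer 'for c in it' loop of _strip_garbage: keep only the group braces
def stripB : List Char → List Char
  | [] => []
  | c :: rest =>
    if c = '<' then stripB (skipB rest)
    else if c = '{' ∨ c = '}' then c :: stripB rest
    else stripB rest
termination_by cs => cs.length
decreasing_by
  · have := skipB_len rest; simp; omega
  · simp
  · simp

-- pass 2 of B: the list of depths of the group openings ('depths' after the loop)
def depthsB : List Char → Int → List Int
  | [], _ => []
  | c :: rest, d =>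
    let d' := if c = '{' then d + 1 else d - 1
    if c = '{' then d' :: depthsB rest d' else depthsB rest d'

def solve_alt (fn_input : String) : Int :=
  (depthsB (stripB (PySem.List.slice fn_input.toList none (some (-1)))) 0).sum

-- ===== PRECONDITION & SPEC =====
def Spec_solve (fn_input : String) (out : Int) : Prop := out = solve_alt fn_input
instance (fn_input : String) (out : Int) : Decidable (Spec_solve fn_input out) := by unfold Spec_solve; infer_instance

-- ===== CLAIM (what is proved, stated in full; the proofs are below) =====
def Claim_equal_solve : Prop := ∀ (fn_input : String), Dom_solve fn_input → Spec_solve fn_input (solve fn_input)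

-- ===== LEMMAS AND PROOFS =====

-- garbage lemma: A's fold from the in-garbage state over cs gives the same points as
-- its fold from the clean state over the stream left after B's inner skip loop
theorem garb_fold (cs : List Char) (p d : Int) :
    (List.foldl stepA (p, d, true, false) cs).1
      = (List.foldl stepA (p, d, false, false) (skipB cs)).1 := by
  induction cs using skipB.induct with
  | case1 => simp [skipB]
  | case2 rest ih =>
    have hs : skipB ('!' :: rest) = skipB (rest.drop 1) := by simp [skipB]
    rw [hs]
    simp only [List.foldl_cons]
    have hstep : stepA (p, d, true, false) '!' = (p, d, true, true) := by simp [stepA]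
    rw [hstep]
    cases rest with
    | nil => simpa using ih
    | cons x rest' =>
      simp only [List.foldl_cons]
      have hstep2 : stepA (p, d, true, true) x = (p, d, true, false) := by simp [stepA]
      rw [hstep2]
      simpa using ih
  | case3 rest h1 =>
    have hs : skipB ('>' :: rest) = rest := by simp [skipB]
    rw [hs]
    simp only [List.foldl_cons]
    have hstep : stepA (p, d, true, false) '>' = (p, d, false, false) := by simp [stepA]
    rw [hstep]
  | case4 g rest h1 h2 ih =>
    have hs : skipB (g :: rest) = skipB rest := by simp [skipB, h1, h2]
    rw [hs]
    simp only [List.foldl_cons]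
    have hstep : stepA (p, d, true, false) g = (p, d, true, false) := by
      simp [stepA, h1, h2]
    rw [hstep]; exact ih

-- main lemma: A's clean fold over cs equals p plus the sum of B's pipeline on cs
theorem main_fold (cs : List Char) :
    ∀ p d : Int, (List.foldl stepA (p, d, false, false) cs).1
      = p + (depthsB (stripB cs) d).sum := by
  induction cs using stripB.induct with
  | case1 => intro p d; simp [stripB, depthsB]
  | case2 rest ih =>
    intro p d
    have hs : stripB ('<' :: rest) = stripB (skipB rest) := by simp [stripB]
    rw [hs]
    simp only [List.foldl_cons]
    have hstep : stepA (p, d, false, false) '<' = (p, d, true, false) := by simp [stepA]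
    rw [hstep, garb_fold]
    exact ih p d
  | case3 c rest h1 h2 ih =>
    intro p d
    have hs : stripB (c :: rest) = c :: stripB rest := by
      rw [stripB]; simp [h1, h2]
    rw [hs]
    simp only [List.foldl_cons]
    rcases h2 with h2 | h2
    · subst h2
      have hstep : stepA (p, d, false, false) '{' = (p + (d + 1), d + 1, false, false) := by
        simp [stepA]
      rw [hstep, ih]
      simp [depthsB]; ring
    · subst h2
      have hstep : stepA (p, d, false, false) '}' = (p, d - 1, false, false) := by
        simp [stepA]
      rw [hstep, ih]
      simp [depthsB]
  | case4 c rest h1 h2 ih =>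
    intro p d
    have hs : stripB (c :: rest) = stripB rest := by
      rw [stripB]; simp [h1, h2]
    rw [hs]
    simp only [List.foldl_cons]
    push Not at h2
    have hstep : stepA (p, d, false, false) c = (p, d, false, false) := by
      simp [stepA, h1, h2.1, h2.2]
    rw [hstep]
    exact ih p d

-- ===== VERDICT (by name: the statement is the Claim_ definition above) =====
theorem solve_spec : Claim_equal_solve := by
  intro fn_input _
  show solve fn_input = solve_alt fn_input
  unfold solve solve_alt
  rw [main_fold]
  simp
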